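-- pv_equiv track=rewrite | github.com/jaemoon99/CodingTest | 프로그래머스/unrated/181837. 커피 심부름/커피 심부름.py | solution
-- ===== SOURCE A (Python) =====
-- def solution(order):
--     answer = 0
--     for x in order:
--         if 'cafelatte' in x:
--             answer += 5000
--         else:
--             answer += 4500
--     return answer
-- ===== SOURCE B (Python) =====
-- def solution(order):
--     def total(lo, hi):
--         n = hi - lo
--         if n == 0:
--             return 0
--         if n == 1:
--             return 5000 if 'cafelatte' in order[lo] else 4500
--         mid = (lo + hi) // 2
--         return total(lo, mid) + total(mid, hi)
--     return total(0, len(order))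
-- ===== Notes on version B (the rewrite author's own statement) =====
-- stated objective: alternative
-- what changed: Replaces A's single left-to-right branch-and-accumulate loop by a divide-and-conquer recursion over index ranges: the range is split at its midpoint and half-totals are summed, pricing single items only at the leaves.
import Mathlib
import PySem

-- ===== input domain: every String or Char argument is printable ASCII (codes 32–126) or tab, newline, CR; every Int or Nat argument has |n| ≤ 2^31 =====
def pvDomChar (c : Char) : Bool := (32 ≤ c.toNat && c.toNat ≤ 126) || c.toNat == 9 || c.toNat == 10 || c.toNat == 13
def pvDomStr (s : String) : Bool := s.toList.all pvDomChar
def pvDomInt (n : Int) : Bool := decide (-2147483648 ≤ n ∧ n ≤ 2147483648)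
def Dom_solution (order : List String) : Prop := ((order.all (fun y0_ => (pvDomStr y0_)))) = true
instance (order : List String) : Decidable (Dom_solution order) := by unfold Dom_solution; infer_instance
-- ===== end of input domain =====

-- B replaces A's left-to-right accumulate loop by a divide-and-conquer recursion over index
-- ranges (split at midpoint, price single items at the leaves); objective: alternative.

-- ===== PORT A =====
def solution (order : List String) : Int :=
  order.foldl (fun answer x =>
    if PySem.Str.isIn "cafelatte" x then answer + 5000 else answer + 4500) 0

-- ===== PORT B =====
-- inner helper 'total(lo, hi)' of Source B; order[lo] is always in range, ported as getD
def solTotal (order : List String) (lo hi : Nat) : Int :=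
  if hi - lo = 0 then 0
  else if hi - lo = 1 then
    (if PySem.Str.isIn "cafelatte" (order.getD lo "") then 5000 else 4500)
  else
    solTotal order lo ((lo + hi) / 2) + solTotal order ((lo + hi) / 2) hi
termination_by hi - lo
decreasing_by all_goals omega

def solution_alt (order : List String) : Int :=
  solTotal order 0 order.length

-- ===== PRECONDITION & SPEC =====
def Spec_solution (order : List String) (out : Int) : Prop := out = solution_alt order
instance (order : List String) (out : Int) : Decidable (Spec_solution order out) := by unfold Spec_solution; infer_instance

-- ===== CLAIM (what is proved, stated in full; the proofs are below) =====
def Claim_equal_solution : Prop := ∀ (order : List String), Dom_solution order → Spec_solution order (solution order)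

-- ===== LEMMAS AND PROOFS =====
def solPrice (x : String) : Int :=
  if PySem.Str.isIn "cafelatte" x then 5000 else 4500

theorem solTotal_eq_sum (order : List String) (lo hi : Nat) (h : lo ≤ hi) :
    solTotal order lo hi = ∑ i ∈ Finset.Ico lo hi, solPrice (order.getD i "") := by
  induction lo, hi using solTotal.induct order with
  | case1 lo hi hn =>
    have : lo = hi := by omega
    subst this
    simp [solTotal]
  | case2 lo hi hn0 hn1 hlat =>
    have : hi = lo + 1 := by omega
    subst this
    simp [solTotal, solPrice]
  | case3 lo hi hn0 hn1 hlat =>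
    have : hi = lo + 1 := by omega
    subst this
    simp [solTotal, solPrice]
  | case4 lo hi hn0 hn1 ih1 ih2 =>
    have h1 : lo ≤ (lo + hi) / 2 := by omega
    have h2 : (lo + hi) / 2 ≤ hi := by omega
    rw [solTotal, if_neg hn0, if_neg hn1, ih1 h1, ih2 h2,
      Finset.sum_Ico_consecutive _ h1 h2]

theorem foldl_eq_sum (order : List String) (a : Int) :
    order.foldl (fun answer x =>
      if PySem.Str.isIn "cafelatte" x then answer + 5000 else answer + 4500) a
    = a + (order.map solPrice).sum := by
  induction order generalizing a with
  | nil => simp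
  | cons x xs ih =>
    simp only [List.foldl_cons, List.map_cons, List.sum_cons, solPrice]
    split_ifs with h <;> rw [ih] <;> ring

theorem sum_map_eq_sum_range (order : List String) :
    (order.map solPrice).sum = ∑ i ∈ Finset.range order.length, solPrice (order.getD i "") := by
  induction order with
  | nil => simp
  | cons x xs ih => simp [Finset.sum_range_succ', ih]; ring

-- ===== VERDICT (by name: the statement is the Claim_ definition above) =====
theorem solution_spec : Claim_equal_solution := by
  intro order _
  unfold Spec_solution solution solution_alt
  rw [solTotal_eq_sum order 0 order.length (Nat.zero_le _), foldl_eq_sum,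
    sum_map_eq_sum_range]
  rw [Finset.range_eq_Ico]
  ring
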